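-- pv_equiv track=rewrite | github.com/KartikIyer27/M25CSA025_NLU_Ass2 | problem1/clean_corpus.py | merge_domain_phrases
-- ===== SOURCE A (Python) =====
-- def merge_domain_phrases(tokens):
--
--     phrase_map = {
--         ("full", "time"): "full_time",
--         ("part", "time"): "part_time",
--         ("dual", "degree"): "dual_degree",
--         ("course", "work"): "course_work",
--         ("grade", "point"): "grade_point",
--         ("academic", "programmes"): "academic_programmes",
--         ("academic", "programs"): "academic_programs",
--         ("computer", "science"): "computer_science",
--         ("artificial", "intelligence"): "artificial_intelligence",
--         ("machine", "learning"): "machine_learning",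
--         ("word", "to", "vec"): "word2vec",
--     }
--
--     max_len = max(len(k) for k in phrase_map)
--     merged = []
--     i = 0
--     while i < len(tokens):
--         matched = False
--         for n in range(max_len, 1, -1):
--             if i + n > len(tokens):
--                 continue
--             candidate = tuple(tokens[i:i + n])
--             if candidate in phrase_map:
--                 merged.append(phrase_map[candidate])
--                 i += n
--                 matched = True
--                 break
--         if not matched:
--             merged.append(tokens[i])
--             i += 1
--
--     return merged
-- ===== SOURCE B (Python) =====
-- def merge_domain_phrases(tokens):
--     # One dict lookup on the FIRST word of a candidate phrase, then a prefix
--     # compare of the remaining words; entries under a head are listed with the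
--     # longest rest first, so the first hit is the longest match.
--     index = {
--         "full": [(["time"], "full_time")],
--         "part": [(["time"], "part_time")],
--         "dual": [(["degree"], "dual_degree")],
--         "course": [(["work"], "course_work")],
--         "grade": [(["point"], "grade_point")],
--         "academic": [(["programmes"], "academic_programmes"),
--                      (["programs"], "academic_programs")],
--         "computer": [(["science"], "computer_science")],
--         "artificial": [(["intelligence"], "artificial_intelligence")],
--         "machine": [(["learning"], "machine_learning")],
--         "word": [(["to", "vec"], "word2vec")],
--     }
--     out = []
--     i = 0
--     n = len(tokens)
--     while i < n:
--         t = tokens[i]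
--         word = t
--         step = 1
--         for rest, merged in index.get(t, ()):
--             if rest == tokens[i + 1 : i + 1 + len(rest)]:
--                 word = merged
--                 step = 1 + len(rest)
--                 break
--         out.append(word)
--         i += step
--     return out
-- ===== Notes on version B (the rewrite author's own statement) =====
-- stated objective: faster
-- what changed: A slices a candidate tuple at each position for every phrase length (3 then 2) and tests dict membership over all 11 phrases; B does one dict lookup keyed on the current token and then compares only that head's rest-of-phrase lists (longest first) against the following tokens.
import Mathlib
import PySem

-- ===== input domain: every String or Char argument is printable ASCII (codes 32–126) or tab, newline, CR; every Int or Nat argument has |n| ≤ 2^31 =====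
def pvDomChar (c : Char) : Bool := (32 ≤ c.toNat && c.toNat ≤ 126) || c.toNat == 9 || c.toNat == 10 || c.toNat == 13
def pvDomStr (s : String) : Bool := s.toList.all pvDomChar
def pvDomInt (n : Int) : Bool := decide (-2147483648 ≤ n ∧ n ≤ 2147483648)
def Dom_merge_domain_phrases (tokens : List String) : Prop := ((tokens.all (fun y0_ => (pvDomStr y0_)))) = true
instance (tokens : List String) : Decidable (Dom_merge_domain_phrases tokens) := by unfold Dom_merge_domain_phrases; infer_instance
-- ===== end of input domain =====

-- B replaces A's longest-first candidate-tuple/dict-membership scan at every position by a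
-- single lookup keyed on the first word followed by a prefix compare of the remaining words
-- (alternative decomposition; same asymptotic cost).  Both ports loop with fuel =
-- tokens.length, which bounds the iteration count since every iteration advances i by ≥ 1.

-- ===== PORT A =====
-- Python dict keys are tuples of mixed arity (2 or 3 words); ported as List String.
def pvPhraseMap : PySem.Dict (List String) String := PySem.Dict.ofList
  [ (["full", "time"], "full_time")
  , (["part", "time"], "part_time")
  , (["dual", "degree"], "dual_degree")
  , (["course", "work"], "course_work")
  , (["grade", "point"], "grade_point")
  , (["academic", "programmes"], "academic_programmes")
  , (["academic", "programs"], "academic_programs")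
  , (["computer", "science"], "computer_science")
  , (["artificial", "intelligence"], "artificial_intelligence")
  , (["machine", "learning"], "machine_learning")
  , (["word", "to", "vec"], "word2vec") ]

-- the 'for n in range(max_len, 1, -1)' loop with its 'continue' / 'break':
-- first hit returns the merged word and the matched length n.
def pvTryA (tokens : List String) (i : Nat) : List Int → Option (String × Int)
  | [] => none
  | n :: ns =>
    if (i : Int) + n > tokens.length then pvTryA tokens i ns
    else
      match pvPhraseMap.get? (PySem.List.slice tokens (some (i : Int)) (some ((i : Int) + n))) with
      | some v => some (v, n)
      | none => pvTryA tokens i ns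

-- the while loop; tokens[i] is only read under i < len, so .getD "" is exact there.
def pvLoopA (tokens : List String) (ns : List Int) : Nat → Nat → List String → List String
  | 0, _, merged => merged
  | fuel + 1, i, merged =>
    if i < tokens.length then
      match pvTryA tokens i ns with
      | some (v, n) => pvLoopA tokens ns fuel (i + n.toNat) (merged ++ [v])
      | none => pvLoopA tokens ns fuel (i + 1) (merged ++ [(PySem.List.pyGet? tokens (i : Int)).getD ""])
    else merged

def merge_domain_phrases (tokens : List String) : List String :=
  let maxLen : Int := ((pvPhraseMap.keys.map (fun k => (k.length : Int))).max?).getD 0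
  pvLoopA tokens (PySem.List.pyRange maxLen 1 (-1)) tokens.length 0 []

-- ===== PORT B =====
def pvIndex : PySem.Dict String (List (List String × String)) := PySem.Dict.ofList
  [ ("full", [(["time"], "full_time")])
  , ("part", [(["time"], "part_time")])
  , ("dual", [(["degree"], "dual_degree")])
  , ("course", [(["work"], "course_work")])
  , ("grade", [(["point"], "grade_point")])
  , ("academic", [(["programmes"], "academic_programmes"), (["programs"], "academic_programs")])
  , ("computer", [(["science"], "computer_science")])
  , ("artificial", [(["intelligence"], "artificial_intelligence")])
  , ("machine", [(["learning"], "machine_learning")])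
  , ("word", [(["to", "vec"], "word2vec")]) ]

-- the 'for rest, merged in index.get(t, ())' loop with its 'break'
def pvScanB (tokens : List String) (i : Nat) : List (List String × String) → Option (String × Nat)
  | [] => none
  | (rest, merged) :: es =>
    if rest = PySem.List.slice tokens (some ((i : Int) + 1)) (some ((i : Int) + 1 + rest.length))
    then some (merged, 1 + rest.length)
    else pvScanB tokens i es

def pvLoopB (tokens : List String) : Nat → Nat → List String → List String
  | 0, _, out => out
  | fuel + 1, i, out =>
    if i < tokens.length then
      let t := (PySem.List.pyGet? tokens (i : Int)).getD ""
      match (match pvIndex.get? t with | none => none | some es => pvScanB tokens i es) with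
      | some (w, s) => pvLoopB tokens fuel (i + s) (out ++ [w])
      | none => pvLoopB tokens fuel (i + 1) (out ++ [t])
    else out

def merge_domain_phrases_alt (tokens : List String) : List String :=
  pvLoopB tokens tokens.length 0 []

-- ===== PRECONDITION & SPEC =====
def Spec_merge_domain_phrases (tokens : List String) (out : List String) : Prop := out = merge_domain_phrases_alt tokens
instance (tokens : List String) (out : List String) : Decidable (Spec_merge_domain_phrases tokens out) := by unfold Spec_merge_domain_phrases; infer_instance

-- ===== CLAIM (what is proved, stated in full; the proofs are below) =====
def Claim_equal_merge_domain_phrases : Prop := ∀ (tokens : List String), Dom_merge_domain_phrases tokens → Spec_merge_domain_phrases tokens (merge_domain_phrases tokens)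

-- ===== LEMMAS AND PROOFS =====

-- pure (suffix-based) forms of the two per-position step functions
def pvSTryA (l : List String) : List Int → Option (String × Int)
  | [] => none
  | n :: ns =>
    if (l.length : Int) < n then pvSTryA l ns
    else
      match pvPhraseMap.get? (l.take n.toNat) with
      | some v => some (v, n)
      | none => pvSTryA l ns

def pvSScan (r : List String) : List (List String × String) → Option (String × Nat)
  | [] => none
  | (rest, merged) :: es =>
    if rest = r.take rest.length then some (merged, 1 + rest.length) else pvSScan r es

lemma hPM : pvPhraseMap = PySem.Dict.mk
  [ (["full", "time"], "full_time")
  , (["part", "time"], "part_time")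
  , (["dual", "degree"], "dual_degree")
  , (["course", "work"], "course_work")
  , (["grade", "point"], "grade_point")
  , (["academic", "programmes"], "academic_programmes")
  , (["academic", "programs"], "academic_programs")
  , (["computer", "science"], "computer_science")
  , (["artificial", "intelligence"], "artificial_intelligence")
  , (["machine", "learning"], "machine_learning")
  , (["word", "to", "vec"], "word2vec") ] := by decide

lemma hIdx : pvIndex = PySem.Dict.mk
  [ ("full", [(["time"], "full_time")])
  , ("part", [(["time"], "part_time")])
  , ("dual", [(["degree"], "dual_degree")])
  , ("course", [(["work"], "course_work")])
  , ("grade", [(["point"], "grade_point")])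
  , ("academic", [(["programmes"], "academic_programmes"), (["programs"], "academic_programs")])
  , ("computer", [(["science"], "computer_science")])
  , ("artificial", [(["intelligence"], "artificial_intelligence")])
  , ("machine", [(["learning"], "machine_learning")])
  , ("word", [(["to", "vec"], "word2vec")]) ] := by decide

lemma pvTryA_eq_sTryA (tokens : List String) (i : Nat) :
    ∀ ns : List Int, (∀ n ∈ ns, 0 < n) → pvTryA tokens i ns = pvSTryA (tokens.drop i) ns := by
  intro ns h
  induction ns with
  | nil => rfl
  | cons n ns ih =>
    have hn : 0 < n := h n (by simp)
    have hns : ∀ m ∈ ns, 0 < m := fun m hm => h m (by simp [hm])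
    have hcond : ((i : Int) + n > tokens.length) ↔ (((tokens.drop i).length : Int) < n) := by
      simp only [List.length_drop]
      omega
    have hslice : PySem.List.slice tokens (some (i : Int)) (some ((i : Int) + n))
        = (tokens.drop i).take n.toNat := by
      rw [PySem.List.slice_toNat tokens (by omega) (by omega)]
      congr 1
      omega
    simp only [pvTryA, pvSTryA, hslice, ih hns]
    by_cases hc : (i : Int) + n > tokens.length
    · rw [if_pos hc, if_pos (hcond.mp hc)]
    · rw [if_neg hc, if_neg (fun hh => hc (hcond.mpr hh))]

lemma pvScanB_eq_sScan (tokens : List String) (i : Nat) :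
    ∀ es, pvScanB tokens i es = pvSScan (tokens.drop (i + 1)) es := by
  intro es
  induction es with
  | nil => rfl
  | cons e es ih =>
    obtain ⟨rest, merged⟩ := e
    have hslice : PySem.List.slice tokens (some ((i : Int) + 1)) (some ((i : Int) + 1 + rest.length))
        = (tokens.drop (i + 1)).take rest.length := by
      rw [PySem.List.slice_toNat tokens (by omega) (by omega)]
      congr 1 <;> omega
    simp only [pvScanB, pvSScan, hslice, ih]

lemma pvGet?_mk_nil {κ ν : Type} [BEq κ] (x : κ) : (PySem.Dict.mk ([] : List (κ × ν))).get? x = none := rfl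

set_option maxHeartbeats 1000000 in
lemma pvCore (t : String) (r : List String) :
    (pvSTryA (t :: r) [3, 2]).map (fun p => (p.1, p.2.toNat)) =
      (match pvIndex.get? t with | none => none | some es => pvSScan r es) := by
  match r with
  | [] =>
    by_cases h0 : "full" = t
    · subst h0; simp [pvSTryA, pvSScan, hPM, hIdx, PySem.Dict.get?_mk_cons, pvGet?_mk_nil] <;> (first | rfl | (split_ifs <;> (first | rfl | omega | simp_all)))
    by_cases h1 : "part" = t
    · subst h1; simp [pvSTryA, pvSScan, hPM, hIdx, PySem.Dict.get?_mk_cons, pvGet?_mk_nil] <;> (first | rfl | (split_ifs <;> (first | rfl | omega | simp_all)))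
    by_cases h2 : "dual" = t
    · subst h2; simp [pvSTryA, pvSScan, hPM, hIdx, PySem.Dict.get?_mk_cons, pvGet?_mk_nil] <;> (first | rfl | (split_ifs <;> (first | rfl | omega | simp_all)))
    by_cases h3 : "course" = t
    · subst h3; simp [pvSTryA, pvSScan, hPM, hIdx, PySem.Dict.get?_mk_cons, pvGet?_mk_nil] <;> (first | rfl | (split_ifs <;> (first | rfl | omega | simp_all)))
    by_cases h4 : "grade" = t
    · subst h4; simp [pvSTryA, pvSScan, hPM, hIdx, PySem.Dict.get?_mk_cons, pvGet?_mk_nil] <;> (first | rfl | (split_ifs <;> (first | rfl | omega | simp_all)))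
    by_cases h5 : "academic" = t
    · subst h5; simp [pvSTryA, pvSScan, hPM, hIdx, PySem.Dict.get?_mk_cons, pvGet?_mk_nil] <;> (first | rfl | (split_ifs <;> (first | rfl | omega | simp_all)))
    by_cases h6 : "computer" = t
    · subst h6; simp [pvSTryA, pvSScan, hPM, hIdx, PySem.Dict.get?_mk_cons, pvGet?_mk_nil] <;> (first | rfl | (split_ifs <;> (first | rfl | omega | simp_all)))
    by_cases h7 : "artificial" = t
    · subst h7; simp [pvSTryA, pvSScan, hPM, hIdx, PySem.Dict.get?_mk_cons, pvGet?_mk_nil] <;> (first | rfl | (split_ifs <;> (first | rfl | omega | simp_all)))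
    by_cases h8 : "machine" = t
    · subst h8; simp [pvSTryA, pvSScan, hPM, hIdx, PySem.Dict.get?_mk_cons, pvGet?_mk_nil] <;> (first | rfl | (split_ifs <;> (first | rfl | omega | simp_all)))
    by_cases h9 : "word" = t
    · subst h9; simp [pvSTryA, pvSScan, hPM, hIdx, PySem.Dict.get?_mk_cons, pvGet?_mk_nil] <;> (first | rfl | (split_ifs <;> (first | rfl | omega | simp_all)))
    · simp [pvSTryA, pvSScan, hPM, hIdx, PySem.Dict.get?_mk_cons, pvGet?_mk_nil, h0, h1, h2, h3, h4, h5, h6, h7, h8, h9] <;> (first | rfl | (split_ifs <;> (first | rfl | omega | simp_all)))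
  | [b] =>
    by_cases h0 : "full" = t
    · subst h0; simp [pvSTryA, pvSScan, hPM, hIdx, PySem.Dict.get?_mk_cons, pvGet?_mk_nil] <;> (first | rfl | (split_ifs <;> (first | rfl | omega | simp_all)))
    by_cases h1 : "part" = t
    · subst h1; simp [pvSTryA, pvSScan, hPM, hIdx, PySem.Dict.get?_mk_cons, pvGet?_mk_nil] <;> (first | rfl | (split_ifs <;> (first | rfl | omega | simp_all)))
    by_cases h2 : "dual" = t
    · subst h2; simp [pvSTryA, pvSScan, hPM, hIdx, PySem.Dict.get?_mk_cons, pvGet?_mk_nil] <;> (first | rfl | (split_ifs <;> (first | rfl | omega | simp_all)))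
    by_cases h3 : "course" = t
    · subst h3; simp [pvSTryA, pvSScan, hPM, hIdx, PySem.Dict.get?_mk_cons, pvGet?_mk_nil] <;> (first | rfl | (split_ifs <;> (first | rfl | omega | simp_all)))
    by_cases h4 : "grade" = t
    · subst h4; simp [pvSTryA, pvSScan, hPM, hIdx, PySem.Dict.get?_mk_cons, pvGet?_mk_nil] <;> (first | rfl | (split_ifs <;> (first | rfl | omega | simp_all)))
    by_cases h5 : "academic" = t
    · subst h5; simp [pvSTryA, pvSScan, hPM, hIdx, PySem.Dict.get?_mk_cons, pvGet?_mk_nil] <;> (first | rfl | (split_ifs <;> (first | rfl | omega | simp_all)))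
    by_cases h6 : "computer" = t
    · subst h6; simp [pvSTryA, pvSScan, hPM, hIdx, PySem.Dict.get?_mk_cons, pvGet?_mk_nil] <;> (first | rfl | (split_ifs <;> (first | rfl | omega | simp_all)))
    by_cases h7 : "artificial" = t
    · subst h7; simp [pvSTryA, pvSScan, hPM, hIdx, PySem.Dict.get?_mk_cons, pvGet?_mk_nil] <;> (first | rfl | (split_ifs <;> (first | rfl | omega | simp_all)))
    by_cases h8 : "machine" = t
    · subst h8; simp [pvSTryA, pvSScan, hPM, hIdx, PySem.Dict.get?_mk_cons, pvGet?_mk_nil] <;> (first | rfl | (split_ifs <;> (first | rfl | omega | simp_all)))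
    by_cases h9 : "word" = t
    · subst h9; simp [pvSTryA, pvSScan, hPM, hIdx, PySem.Dict.get?_mk_cons, pvGet?_mk_nil] <;> (first | rfl | (split_ifs <;> (first | rfl | omega | simp_all)))
    · simp [pvSTryA, pvSScan, hPM, hIdx, PySem.Dict.get?_mk_cons, pvGet?_mk_nil, h0, h1, h2, h3, h4, h5, h6, h7, h8, h9] <;> (first | rfl | (split_ifs <;> (first | rfl | omega | simp_all)))
  | b :: c :: r' =>
    by_cases h0 : "full" = t
    · subst h0; simp [pvSTryA, pvSScan, hPM, hIdx, PySem.Dict.get?_mk_cons, pvGet?_mk_nil] <;> (first | rfl | (split_ifs <;> (first | rfl | omega | simp_all)))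
    by_cases h1 : "part" = t
    · subst h1; simp [pvSTryA, pvSScan, hPM, hIdx, PySem.Dict.get?_mk_cons, pvGet?_mk_nil] <;> (first | rfl | (split_ifs <;> (first | rfl | omega | simp_all)))
    by_cases h2 : "dual" = t
    · subst h2; simp [pvSTryA, pvSScan, hPM, hIdx, PySem.Dict.get?_mk_cons, pvGet?_mk_nil] <;> (first | rfl | (split_ifs <;> (first | rfl | omega | simp_all)))
    by_cases h3 : "course" = t
    · subst h3; simp [pvSTryA, pvSScan, hPM, hIdx, PySem.Dict.get?_mk_cons, pvGet?_mk_nil] <;> (first | rfl | (split_ifs <;> (first | rfl | omega | simp_all)))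
    by_cases h4 : "grade" = t
    · subst h4; simp [pvSTryA, pvSScan, hPM, hIdx, PySem.Dict.get?_mk_cons, pvGet?_mk_nil] <;> (first | rfl | (split_ifs <;> (first | rfl | omega | simp_all)))
    by_cases h5 : "academic" = t
    · subst h5; simp [pvSTryA, pvSScan, hPM, hIdx, PySem.Dict.get?_mk_cons, pvGet?_mk_nil] <;> (first | rfl | (split_ifs <;> (first | rfl | omega | simp_all)))
    by_cases h6 : "computer" = t
    · subst h6; simp [pvSTryA, pvSScan, hPM, hIdx, PySem.Dict.get?_mk_cons, pvGet?_mk_nil] <;> (first | rfl | (split_ifs <;> (first | rfl | omega | simp_all)))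
    by_cases h7 : "artificial" = t
    · subst h7; simp [pvSTryA, pvSScan, hPM, hIdx, PySem.Dict.get?_mk_cons, pvGet?_mk_nil] <;> (first | rfl | (split_ifs <;> (first | rfl | omega | simp_all)))
    by_cases h8 : "machine" = t
    · subst h8; simp [pvSTryA, pvSScan, hPM, hIdx, PySem.Dict.get?_mk_cons, pvGet?_mk_nil] <;> (first | rfl | (split_ifs <;> (first | rfl | omega | simp_all)))
    by_cases h9 : "word" = t
    · subst h9; simp [pvSTryA, pvSScan, hPM, hIdx, PySem.Dict.get?_mk_cons, pvGet?_mk_nil] <;> (first | rfl | (split_ifs <;> (first | rfl | omega | simp_all)))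
    · simp [pvSTryA, pvSScan, hPM, hIdx, PySem.Dict.get?_mk_cons, pvGet?_mk_nil, h0, h1, h2, h3, h4, h5, h6, h7, h8, h9] <;> (first | rfl | (split_ifs <;> (first | rfl | omega | simp_all)))


lemma pvLoops_eq (tokens : List String) :
    ∀ (fuel i : Nat) (out : List String),
      pvLoopA tokens [3, 2] fuel i out = pvLoopB tokens fuel i out := by
  intro fuel
  induction fuel with
  | zero => intro i out; rfl
  | succ fuel ih =>
    intro i out
    simp only [pvLoopA, pvLoopB]
    by_cases h : i < tokens.length
    · rw [if_pos h, if_pos h]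
      have hget : (PySem.List.pyGet? tokens (i : Int)).getD "" = tokens[i] := by
        simp [PySem.List.pyGet?, PySem.List.pyIdx?, h]
      have hdrop : tokens.drop i = tokens[i] :: tokens.drop (i + 1) :=
        List.drop_eq_getElem_cons h
      have hstep : (pvTryA tokens i [3, 2]).map (fun p => (p.1, p.2.toNat)) =
          (match pvIndex.get? tokens[i] with | none => none | some es => pvScanB tokens i es) := by
        rw [pvTryA_eq_sTryA tokens i [3, 2] (by decide), hdrop, pvCore]
        simp only [pvScanB_eq_sScan tokens i]
      rw [hget]
      cases hA : pvTryA tokens i [3, 2] with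
      | none =>
        have hB : (match pvIndex.get? tokens[i] with | none => none | some es => pvScanB tokens i es)
            = (none : Option (String × Nat)) := by rw [← hstep, hA]; rfl
        rw [hB]
        exact ih (i + 1) (out ++ [tokens[i]])
      | some p =>
        obtain ⟨v, n⟩ := p
        have hB : (match pvIndex.get? tokens[i] with | none => none | some es => pvScanB tokens i es)
            = some (v, n.toNat) := by rw [← hstep, hA]; rfl
        rw [hB]
        exact ih (i + n.toNat) (out ++ [v])
    · rw [if_neg h, if_neg h]

lemma pvMergeA_eq (tokens : List String) :
    merge_domain_phrases tokens = pvLoopA tokens [3, 2] tokens.length 0 [] := rfl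

-- ===== VERDICT (by name: the statement is the Claim_ definition above) =====
theorem merge_domain_phrases_spec : Claim_equal_merge_domain_phrases := by
  intro tokens _
  unfold Spec_merge_domain_phrases merge_domain_phrases_alt
  rw [pvMergeA_eq, pvLoops_eq]
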